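-- pv_equiv track=rewrite | github.com/lisadean/funky-stuff | longvowel.py | longvowel
-- ===== SOURCE A (Python) =====
-- def longvowel(text):
--     # text = "scoot the door open for the cheese"
--
--     vowels = "aaeeiioouu"
--
--     new_string = ""
--     for i in range(len(text)):
--
--         if text[i] in vowels and (i + 1) < len(text):
--             if text[i] == text[i + 1]:
--                 new_string += (text[i] * 4)
--             else:
--                 new_string += text[i]
--         else:
--             new_string += text[i]
--
--     return new_string
-- ===== SOURCE B (Python) =====
-- def longvowel(text):
--     # Single pass over runs of identical characters: a run of L equal vowels
--     # becomes 4*L-3 copies (each non-final vowel of the run quadrupled),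
--     # any other run is kept as is.
--     pieces = []
--     run_char = None
--     run_len = 0
--     for ch in text:
--         if ch == run_char:
--             run_len += 1
--         else:
--             if run_char is not None:
--                 pieces.append(run_char * (4 * run_len - 3 if run_char in "aeiou" else run_len))
--             run_char = ch
--             run_len = 1
--     if run_char is not None:
--         pieces.append(run_char * (4 * run_len - 3 if run_char in "aeiou" else run_len))
--     return "".join(pieces)
-- ===== Notes on version B (the rewrite author's own statement) =====
-- stated objective: alternative
-- what changed: Replaced the per-index lookahead loop (text[i] vs text[i+1] with string +=) by a single run-length pass: maximal runs of equal characters are accumulated and each vowel run of length L is emitted as the closed form 4*L-3 copies, with the pieces joined at the end.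
import Mathlib
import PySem

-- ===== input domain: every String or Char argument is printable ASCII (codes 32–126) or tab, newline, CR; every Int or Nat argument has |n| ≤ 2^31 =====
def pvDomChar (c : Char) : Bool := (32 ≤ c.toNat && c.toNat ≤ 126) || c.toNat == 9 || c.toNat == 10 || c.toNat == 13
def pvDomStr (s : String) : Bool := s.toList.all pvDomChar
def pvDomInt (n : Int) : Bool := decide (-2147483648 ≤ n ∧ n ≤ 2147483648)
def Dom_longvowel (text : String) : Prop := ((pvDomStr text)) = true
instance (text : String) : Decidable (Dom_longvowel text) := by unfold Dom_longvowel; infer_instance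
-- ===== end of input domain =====

-- B replaces A's per-index lookahead loop by a single run-length pass emitting 4*L-3
-- copies per vowel run (alternative decomposition, same result).


-- ===== PORT A =====
-- vowels = "aaeeiioouu" is inlined; index i always lies in range(len(text)), so
-- List.getD is exact for text[i]
def longvowel (text : String) : String :=
  String.mk <| (List.range text.toList.length).foldl (fun acc i =>
    if text.toList.getD i ' ' ∈ "aaeeiioouu".toList ∧ i + 1 < text.toList.length then
      if text.toList.getD i ' ' = text.toList.getD (i + 1) ' ' then
        acc ++ List.replicate 4 (text.toList.getD i ' ')
      else
        acc ++ [text.toList.getD i ' ']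
    else
      acc ++ [text.toList.getD i ' ']) []

-- ===== PORT B =====
-- run_char * (4*run_len-3 if run_char in "aeiou" else run_len); Nat subtraction is
-- exact here since Python's c * k is "" for k ≤ 0 just as replicate 0 is []
def lvPiece (c : Char) (k : Nat) : List Char :=
  if c ∈ "aeiou".toList then List.replicate (4 * k - 3) c else List.replicate k c

-- one step of Source B's for-loop over (run_char, run_len, pieces)
def lvStep (st : Option Char × Nat × List (List Char)) (ch : Char) :
    Option Char × Nat × List (List Char) :=
  match st with
  | (some rc, rl, out) =>
      if ch = rc then (some rc, rl + 1, out)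
      else (some ch, 1, out ++ [lvPiece rc rl])
  | (none, _, out) => (some ch, 1, out)

-- the trailing flush plus "".join(pieces)
def lvFinish : Option Char × Nat × List (List Char) → List Char
  | (some rc, rl, out) => (out ++ [lvPiece rc rl]).flatten
  | (none, _, out) => out.flatten

def longvowel_alt (text : String) : String :=
  String.mk (lvFinish (text.toList.foldl lvStep (none, 0, [])))

-- ===== PRECONDITION & SPEC =====
def Spec_longvowel (text : String) (out : String) : Prop := out = longvowel_alt text
instance (text : String) (out : String) : Decidable (Spec_longvowel text out) := by unfold Spec_longvowel; infer_instance

-- ===== CLAIM (what is proved, stated in full; the proofs are below) =====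
def Claim_equal_longvowel : Prop := ∀ (text : String), Dom_longvowel text → Spec_longvowel text (longvowel text)

-- ===== LEMMAS AND PROOFS =====

-- common reference: process the list with one-character lookahead
def lvSpec : List Char → List Char
  | [] => []
  | c :: rest =>
      (if c ∈ "aeiou".toList ∧ rest.head? = some c then List.replicate 4 c else [c])
        ++ lvSpec rest

-- the ten-character vowel string of A tests the same set as B's five-character one
lemma lv_mem_vowels (c : Char) :
    (c ∈ "aaeeiioouu".toList) ↔ (c ∈ "aeiou".toList) := by
  have h1 : ("aaeeiioouu".toList) = ['a','a','e','e','i','i','o','o','u','u'] := rfl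
  have h2 : ("aeiou".toList) = ['a','e','i','o','u'] := rfl
  rw [h1, h2]
  simp only [List.mem_cons, List.not_mem_nil, or_false]
  tauto

-- A's loop body as a per-index emission
def lvEmit (l : List Char) (i : Nat) : List Char :=
  if l.getD i ' ' ∈ "aaeeiioouu".toList ∧ i + 1 < l.length then
    if l.getD i ' ' = l.getD (i + 1) ' ' then List.replicate 4 (l.getD i ' ')
    else [l.getD i ' ']
  else [l.getD i ' ']

lemma lv_foldl_emit (l : List Char) (xs : List Nat) (a : List Char) :
    xs.foldl (fun acc i =>
      if l.getD i ' ' ∈ "aaeeiioouu".toList ∧ i + 1 < l.length then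
        if l.getD i ' ' = l.getD (i + 1) ' ' then acc ++ List.replicate 4 (l.getD i ' ')
        else acc ++ [l.getD i ' ']
      else acc ++ [l.getD i ' ']) a = a ++ xs.flatMap (lvEmit l) := by
  induction xs generalizing a with
  | nil => simp
  | cons x xs ih =>
      simp only [List.foldl_cons, List.flatMap_cons, ih, lvEmit]
      split_ifs <;> simp

lemma lv_emit_shift (c : Char) (rest : List Char) (i : Nat) :
    lvEmit (c :: rest) (i + 1) = lvEmit rest i := by
  simp [lvEmit]

lemma lv_emit_zero (c : Char) (rest : List Char) :
    lvEmit (c :: rest) 0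
      = (if c ∈ "aeiou".toList ∧ rest.head? = some c then List.replicate 4 c else [c]) := by
  cases rest with
  | nil => simp [lvEmit]
  | cons d rest' =>
      unfold lvEmit
      simp only [lv_mem_vowels, List.getD_cons_zero, List.getD_cons_succ,
        List.length_cons, List.head?_cons, Option.some.injEq]
      have hlt : 0 + 1 < rest'.length + 1 + 1 := by omega
      by_cases hv : c ∈ "aeiou".toList
      · rw [if_pos ⟨hv, hlt⟩]
        by_cases hcd : c = d
        · rw [if_pos hcd, if_pos ⟨hv, hcd.symm⟩]
        · rw [if_neg hcd, if_neg (fun h => hcd h.2.symm)]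
      · rw [if_neg (fun h => hv h.1), if_neg (fun h => hv h.1)]

lemma lv_a_spec (l : List Char) :
    (List.range l.length).flatMap (lvEmit l) = lvSpec l := by
  induction l with
  | nil => simp [lvSpec]
  | cons c rest ih =>
      rw [List.length_cons, List.range_succ_eq_map, List.flatMap_cons]
      have h : (List.map (· + 1) (List.range rest.length)).flatMap (lvEmit (c :: rest))
          = (List.range rest.length).flatMap (lvEmit rest) := by
        rw [List.flatMap_map]
        exact List.flatMap_congr (fun i _ => lv_emit_shift c rest i)
      rw [h, ih, lv_emit_zero, lvSpec]

-- peeling one maximal run of k copies of c off lvSpec gives exactly one piece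
lemma lv_spec_run (c : Char) (k : Nat) (rest : List Char) (hk : 1 ≤ k)
    (hne : rest.head? ≠ some c) :
    lvSpec (List.replicate k c ++ rest) = lvPiece c k ++ lvSpec rest := by
  induction k with
  | zero => omega
  | succ k ih =>
      cases Nat.eq_zero_or_pos k with
      | inl h0 =>
          subst h0
          simp only [List.replicate_succ, List.replicate_zero, List.cons_append, List.nil_append, lvSpec]
          rw [if_neg (fun h => hne h.2)]
          unfold lvPiece
          split_ifs <;> norm_num
      | inr hk1 =>
          have hhead : (List.replicate k c ++ rest).head? = some c := by
            cases k with
            | zero => omega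
            | succ m => simp [List.replicate_succ]
          rw [List.replicate_succ, List.cons_append]
          simp only [lvSpec, hhead, and_true]
          rw [ih hk1, ← List.append_assoc]
          congr 1
          unfold lvPiece
          by_cases hv : c ∈ "aeiou".toList
          · rw [if_pos hv, if_pos hv, if_pos hv, ← List.replicate_add]
            congr 1
            omega
          · rw [if_neg hv, if_neg hv, if_neg hv, List.singleton_append,
              ← List.replicate_succ]

-- B's fold invariant: a pending run of k ≥ 1 copies of c plus the remaining input
lemma lv_b_inv (rest : List Char) (c : Char) (k : Nat) (out : List (List Char))
    (hk : 1 ≤ k) :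
    lvFinish (rest.foldl lvStep (some c, k, out))
      = out.flatten ++ lvSpec (List.replicate k c ++ rest) := by
  induction rest generalizing c k out with
  | nil =>
      simp only [List.foldl_nil, lvFinish, List.append_nil]
      rw [show List.replicate k c = List.replicate k c ++ [] from (List.append_nil _).symm,
        lv_spec_run c k [] hk (by simp)]
      simp [lvSpec]
  | cons d rest ih =>
      simp only [List.foldl_cons, lvStep]
      split_ifs with hd
      · rw [ih c (k + 1) out (by omega)]
        have h : List.replicate k c ++ d :: rest = List.replicate (k + 1) c ++ rest := by
          rw [hd, List.replicate_succ', List.append_assoc]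
          rfl
        rw [h]
      · rw [ih d 1 (out ++ [lvPiece c k]) (le_refl 1)]
        rw [List.flatten_append, List.append_assoc]
        congr 1
        simp only [List.flatten]
        rw [lv_spec_run c k (d :: rest) hk (by simpa using hd)]
        simp [List.replicate_one, lvSpec]

lemma lv_b_spec (l : List Char) :
    lvFinish (l.foldl lvStep (none, 0, [])) = lvSpec l := by
  cases l with
  | nil => simp [lvFinish, lvSpec]
  | cons c rest =>
      simp only [List.foldl_cons, lvStep]
      rw [lv_b_inv rest c 1 [] (le_refl 1)]
      simp [List.replicate_one]

-- ===== VERDICT (by name: the statement is the Claim_ definition above) =====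
theorem longvowel_spec : Claim_equal_longvowel := by
  intro text _
  unfold Spec_longvowel longvowel longvowel_alt
  rw [lv_foldl_emit, lv_a_spec, List.nil_append, lv_b_spec]
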